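-- pv_equiv track=rewrite | github.com/S4mur419020/kock-k-gyak2 | feladatok.py | fel5_2
-- ===== SOURCE A (Python) =====
-- def fel5_2(dobas_lista):
--     i:int=0
--     egy:int=0
--     ketto:int=0
--     harom:int=0
--     negy:int=0
--     ot:int=0
--     hat:int=0
--     while(i<len(dobas_lista)):
--         if(dobas_lista[i]==1):
--             egy+=1
--         elif(dobas_lista[i]==2):
--             ketto+=1
--         elif(dobas_lista[i]==3):
--             harom+=1
--         elif(dobas_lista[i]==4):
--             negy+=1
--         elif(dobas_lista[i]==5):
--             ot+=1
--         elif(dobas_lista[i]==6):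
--             hat+=1
--         i+=1
--
--     return egy, ketto, harom, negy, ot, hat
-- ===== SOURCE B (Python) =====
-- def fel5_2(dobas_lista):
--     return tuple(dobas_lista.count(k) for k in (1, 2, 3, 4, 5, 6))
-- ===== Notes on version B (the rewrite author's own statement) =====
-- stated objective: simpler
-- what changed: Replaces the indexed while-loop with a 6-way if/elif chain over six manual accumulators by six independent list.count scans, one per face value.
import Mathlib
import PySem

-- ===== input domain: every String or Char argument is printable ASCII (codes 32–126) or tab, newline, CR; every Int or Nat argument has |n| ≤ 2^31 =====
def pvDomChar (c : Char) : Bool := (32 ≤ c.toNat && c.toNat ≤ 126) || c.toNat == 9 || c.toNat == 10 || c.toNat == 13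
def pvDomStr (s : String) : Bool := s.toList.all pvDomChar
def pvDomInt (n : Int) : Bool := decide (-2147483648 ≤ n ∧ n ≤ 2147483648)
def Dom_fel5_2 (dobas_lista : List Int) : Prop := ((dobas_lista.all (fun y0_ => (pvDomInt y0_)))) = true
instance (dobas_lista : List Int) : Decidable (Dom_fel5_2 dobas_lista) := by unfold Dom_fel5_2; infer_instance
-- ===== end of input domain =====

-- B replaces A's indexed while-loop with its 6-way if/elif chain by six independent list.count scans (objective: simpler).


-- ===== PORT A =====
-- the while-loop over i with the six accumulators, as structural recursion over the list
def fel5_2Loop (xs : List Int) (egy ketto harom negy ot hat : Int) :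
    Int × Int × Int × Int × Int × Int :=
  match xs with
  | [] => (egy, ketto, harom, negy, ot, hat)
  | x :: rest =>
      if x == 1 then fel5_2Loop rest (egy + 1) ketto harom negy ot hat
      else if x == 2 then fel5_2Loop rest egy (ketto + 1) harom negy ot hat
      else if x == 3 then fel5_2Loop rest egy ketto (harom + 1) negy ot hat
      else if x == 4 then fel5_2Loop rest egy ketto harom (negy + 1) ot hat
      else if x == 5 then fel5_2Loop rest egy ketto harom negy (ot + 1) hat
      else if x == 6 then fel5_2Loop rest egy ketto harom negy ot (hat + 1)
      else fel5_2Loop rest egy ketto harom negy ot hat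

def fel5_2 (dobas_lista : List Int) : Int × Int × Int × Int × Int × Int :=
  fel5_2Loop dobas_lista 0 0 0 0 0 0

-- ===== PORT B =====
def fel5_2_alt (dobas_lista : List Int) : Int × Int × Int × Int × Int × Int :=
  ((PySem.List.count dobas_lista 1 : Int), (PySem.List.count dobas_lista 2 : Int),
   (PySem.List.count dobas_lista 3 : Int), (PySem.List.count dobas_lista 4 : Int),
   (PySem.List.count dobas_lista 5 : Int), (PySem.List.count dobas_lista 6 : Int))

-- ===== PRECONDITION & SPEC =====
def Spec_fel5_2 (dobas_lista : List Int) (out : Int × Int × Int × Int × Int × Int) : Prop := out = fel5_2_alt dobas_lista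
instance (dobas_lista : List Int) (out : Int × Int × Int × Int × Int × Int) : Decidable (Spec_fel5_2 dobas_lista out) := by unfold Spec_fel5_2; infer_instance

-- ===== CLAIM (what is proved, stated in full; the proofs are below) =====
def Claim_equal_fel5_2 : Prop := ∀ (dobas_lista : List Int), Dom_fel5_2 dobas_lista → Spec_fel5_2 dobas_lista (fel5_2 dobas_lista)

-- ===== LEMMAS AND PROOFS =====
theorem fel5_2Loop_eq (xs : List Int) (egy ketto harom negy ot hat : Int) :
    fel5_2Loop xs egy ketto harom negy ot hat =
      (egy + (xs.count 1 : Int), ketto + (xs.count 2 : Int), harom + (xs.count 3 : Int),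
       negy + (xs.count 4 : Int), ot + (xs.count 5 : Int), hat + (xs.count 6 : Int)) := by
  induction xs generalizing egy ketto harom negy ot hat with
  | nil => simp [fel5_2Loop]
  | cons x rest ih =>
      simp only [fel5_2Loop, ih, beq_iff_eq]
      split_ifs with h1 h2 h3 h4 h5 h6
      · subst h1; simp [Prod.ext_iff]; omega
      · subst h2; simp [Prod.ext_iff, h1]; omega
      · subst h3; simp [Prod.ext_iff, h1]; omega
      · subst h4; simp [Prod.ext_iff, h1]; omega
      · subst h5; simp [Prod.ext_iff, h1]; omega
      · subst h6; simp [Prod.ext_iff, h1]; omega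
      · simp [h1, h2, h3, h4, h5, h6]

-- ===== VERDICT (by name: the statement is the Claim_ definition above) =====
theorem fel5_2_spec : Claim_equal_fel5_2 := by
  intro xs _
  unfold Spec_fel5_2 fel5_2 fel5_2_alt
  simp [fel5_2Loop_eq, PySem.List.count_eq]
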